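-- pv_equiv track=rewrite | github.com/Mortal/countdown | numbers.py | non_singleton_splits
-- ===== SOURCE A (Python) =====
-- from typing import Iterable, List, Set, Tuple
--
-- def non_singleton_splits(bitmask: int) -> Iterable[Tuple[int, ...]]:
--     def visit(b: int, a: int) -> Iterable[Tuple[int, ...]]:
--         lsb = b & -b
--         if lsb == b:
--             if a:
--                 yield (a + b,)
--         else:
--             yield from visit(b - lsb, a + lsb)
--             if a:
--                 for xs in visit(b - lsb, 0):
--                     yield (a + lsb, *xs)
--
--     return visit(bitmask, 0)
-- ===== SOURCE B (Python) =====
-- def non_singleton_splits(bitmask):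
--     bits = []
--     b = bitmask
--     while b:
--         lsb = b & -b
--         bits.append(lsb)
--         b -= lsb
--
--     def g(s):
--         m = len(s)
--         if m < 2:
--             return
--         total = 0
--         for x in s:
--             total += x
--         yield (total,)
--         for k in reversed(range(2, m - 1)):
--             first = 0
--             for x in s[:k]:
--                 first += x
--             for cont in g(s[k:]):
--                 yield (first, *cont)
--
--     return g(bits)
-- ===== Notes on version B (the rewrite author's own statement) =====
-- stated objective: alternative
-- what changed: A enumerates splits by a per-bit binary recursion threading an accumulator through visit(b, a); B first extracts the ascending list of set bits and then recurses over suffixes of that list, iterating over the length of the first block, which removes the accumulator entirely.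
import Mathlib
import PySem

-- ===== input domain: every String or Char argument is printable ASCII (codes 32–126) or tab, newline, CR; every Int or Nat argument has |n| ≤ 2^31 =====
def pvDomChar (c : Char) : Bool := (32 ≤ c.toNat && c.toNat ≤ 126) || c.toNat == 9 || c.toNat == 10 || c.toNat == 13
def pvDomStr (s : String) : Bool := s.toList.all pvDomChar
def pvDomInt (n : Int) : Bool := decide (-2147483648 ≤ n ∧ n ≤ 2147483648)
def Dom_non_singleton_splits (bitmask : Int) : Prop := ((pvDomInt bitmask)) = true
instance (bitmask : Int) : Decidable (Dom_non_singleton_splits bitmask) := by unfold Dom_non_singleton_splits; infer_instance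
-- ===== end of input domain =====

-- B replaces A's per-bit binary recursion (absorb lsb into the accumulator vs close the block)
-- by first extracting the list of set bits and then recursing over suffixes of that list,
-- iterating over the length of the first block; objective: alternative (same cost).
-- Both programs fail to terminate on negative bitmasks, hence Pre_ below.

-- ===== PORT A =====
-- visit(b, a); the fuel argument only makes the recursion total (one unit per peeled bit).
def pvVisitA : Nat → Int → Int → List (List Int)
  | 0, _, _ => []
  | fuel+1, b, a =>
    let lsb := PySem.Int.band b (-b)
    if lsb = b then
      (if a ≠ 0 then [[a + b]] else [])
    else
      pvVisitA fuel (b - lsb) (a + lsb) ++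
        (if a ≠ 0 then (pvVisitA fuel (b - lsb) 0).map (fun xs => (a + lsb) :: xs) else [])

def non_singleton_splits (bitmask : Int) : List (List Int) :=
  pvVisitA (bitmask.toNat + 1) bitmask 0

-- ===== PORT B =====
-- the `while b:` bit-extraction loop (fuel again only for totality)
def pvBits : Nat → Int → List Int
  | 0, _ => []
  | fuel+1, b =>
    if b = 0 then []
    else
      let lsb := PySem.Int.band b (-b)
      lsb :: pvBits fuel (b - lsb)

-- `total = 0; for x in s: total += x`
def pvSum (l : List Int) : Int := l.foldl (· + ·) 0

-- the generator g(s) of Source B, on the suffix list s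
def pvG (s : List Int) : List (List Int) :=
  if _h : s.length < 2 then []
  else
    [pvSum s] ::
      ((PySem.List.pyRange 2 ((s.length : Int) - 1) 1).reverse.attach.flatMap
        (fun k => (pvG (s.drop k.1.toNat)).map (fun cont => pvSum (s.take k.1.toNat) :: cont)))
termination_by s.length
decreasing_by
  have hk : (2 : Int) ≤ k.1 ∧ k.1 < (s.length : Int) - 1 := by
    have := k.2
    rw [List.mem_reverse, PySem.List.mem_pyRange_one] at this
    exact this
  have h2 : 2 ≤ k.1.toNat := by omega
  simp only [List.length_drop]
  omega

def non_singleton_splits_alt (bitmask : Int) : List (List Int) :=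
  pvG (pvBits (bitmask.toNat + 1) bitmask)

-- ===== PRECONDITION & SPEC =====
-- A's recursion (and B's bit-extraction loop) never terminates on a negative bitmask,
-- so those inputs are excluded; A returns normally on every nonnegative bitmask.
def Pre_non_singleton_splits (bitmask : Int) : Prop := 0 ≤ bitmask
instance (bitmask : Int) : Decidable (Pre_non_singleton_splits bitmask) := by unfold Pre_non_singleton_splits; infer_instance
def pvWitness_non_singleton_splits : Int := (63)

def Spec_non_singleton_splits (bitmask : Int) (out : List (List Int)) : Prop := out = non_singleton_splits_alt bitmask
instance (bitmask : Int) (out : List (List Int)) : Decidable (Spec_non_singleton_splits bitmask out) := by unfold Spec_non_singleton_splits; infer_instance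

-- ===== CLAIM (what is proved, stated in full; the proofs are below) =====
def Claim_equal_non_singleton_splits : Prop := ∀ (bitmask : Int), Dom_non_singleton_splits bitmask → Pre_non_singleton_splits bitmask → Spec_non_singleton_splits bitmask (non_singleton_splits bitmask)

-- ===== LEMMAS AND PROOFS =====

-- bounds for the lowest-set-bit expression b & -b
theorem pvLsb_bounds (b : Int) (hb : 0 < b) :
    0 < PySem.Int.band b (-b) ∧ PySem.Int.band b (-b) ≤ b := by
  rw [PySem.Int.band.eq_1]
  have h1 : ¬ (0 : Int) ≤ -b := by omega
  have h2 : (0 : Int) ≤ b := le_of_lt hb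
  simp only [h2, if_true, h1, if_false]
  have hand : b.toNat &&& (-(-b) - 1).toNat ≤ (-(-b) - 1).toNat := Nat.and_le_right
  have : (-(-b) - 1).toNat = b.toNat - 1 := by omega
  omega

-- the list of set bits of b, fuel-free (spec-side twin of pvBits)
def pvBitsI (b : Int) : List Int :=
  if h : 0 < b then
    PySem.Int.band b (-b) :: pvBitsI (b - PySem.Int.band b (-b))
  else []
termination_by b.toNat
decreasing_by
  have := pvLsb_bounds b h
  omega

-- spec-side twin of A's visit, acting on the bit list
def pvFA : List Int → Int → List (List Int)
  | [], a => if a ≠ 0 then [[a]] else []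
  | [x], a => if a ≠ 0 then [[a + x]] else []
  | x :: y :: rest, a =>
    pvFA (y :: rest) (a + x) ++
      (if a ≠ 0 then (pvFA (y :: rest) 0).map (fun xs => (a + x) :: xs) else [])

-- the descending integer list [j, j-1, …, 1]
def pvDesc (j : Int) : List Int :=
  if h : 1 ≤ j then j :: pvDesc (j - 1) else []
termination_by j.toNat
decreasing_by omega

-- the tail items of a yield round: for k ∈ ks, first block = a + sum of the first k bits
def pvTails (s : List Int) (a : Int) (ks : List Int) : List (List Int) :=
  ks.flatMap (fun k => (pvG (s.drop k.toNat)).map (fun xs => (a + pvSum (s.take k.toNat)) :: xs))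

theorem pvFoldl_shift : ∀ (t : List Int) (a : Int), t.foldl (· + ·) a = a + t.foldl (· + ·) 0 := by
  intro t
  induction t with
  | nil => intro a; simp
  | cons z zs ihz => intro a; simp only [List.foldl_cons]; rw [ihz (a + z), ihz (0 + z)]; ring

theorem pvSum_cons (x : Int) (l : List Int) : pvSum (x :: l) = x + pvSum l := by
  simp only [pvSum, List.foldl_cons]
  rw [pvFoldl_shift l (0 + x)]
  ring_nf

-- unfold helpers
theorem pvDesc_pos {j : Int} (h : 1 ≤ j) : pvDesc j = j :: pvDesc (j - 1) := by
  rw [pvDesc, dif_pos h]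

theorem pvDesc_neg {j : Int} (h : ¬ 1 ≤ j) : pvDesc j = [] := by
  rw [pvDesc, dif_neg h]

theorem pvBitsI_cons {b : Int} (h : 0 < b) :
    pvBitsI b = PySem.Int.band b (-b) :: pvBitsI (b - PySem.Int.band b (-b)) := by
  rw [pvBitsI, dif_pos h]

theorem pvBitsI_nil {b : Int} (h : ¬ 0 < b) : pvBitsI b = [] := by
  rw [pvBitsI, dif_neg h]

theorem pvBits_eq (fuel : Nat) : ∀ b : Int, 0 ≤ b → b.toNat < fuel →
    pvBits fuel b = pvBitsI b := by
  induction fuel with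
  | zero => intro b _ h; omega
  | succ n ih =>
    intro b hb hf
    rw [pvBits, pvBitsI]
    by_cases h0 : b = 0
    · simp [h0]
    · have hpos : 0 < b := by omega
      have hl := pvLsb_bounds b hpos
      simp only [h0, if_false, dif_pos hpos]
      congr 1
      exact ih _ (by omega) (by omega)

theorem pvBitsI_pos : ∀ b : Int, ∀ z ∈ pvBitsI b, 0 < z := by
  intro b
  induction b using pvBitsI.induct with
  | case1 b hpos ih =>
    intro z hz
    rw [pvBitsI, dif_pos hpos] at hz
    rcases List.mem_cons.mp hz with h | h
    · subst h; exact (pvLsb_bounds b hpos).1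
    · exact ih z h
  | case2 b hpos =>
    intro z hz
    rw [pvBitsI, dif_neg hpos] at hz
    simp at hz

theorem pvBitsI_ne_nil (b : Int) (hb : 0 < b) : pvBitsI b ≠ [] := by
  rw [pvBitsI, dif_pos hb]; simp

theorem pvVisit_eq (fuel : Nat) : ∀ b a : Int, 0 ≤ b → b.toNat < fuel →
    pvVisitA fuel b a = pvFA (pvBitsI b) a := by
  induction fuel with
  | zero => intro b a _ h; omega
  | succ n ih =>
    intro b a hb hf
    by_cases h0 : b = 0
    · subst h0
      rw [pvBitsI_nil (by omega)]
      simp [pvVisitA, pvFA]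
    · have hpos : 0 < b := by omega
      have hl := pvLsb_bounds b hpos
      rw [pvBitsI_cons hpos]
      by_cases heq : PySem.Int.band b (-b) = b
      · -- single bit: b - lsb = 0
        rw [show b - PySem.Int.band b (-b) = 0 from by omega]
        rw [pvBitsI_nil (by omega)]
        show (if PySem.Int.band b (-b) = b then (if a ≠ 0 then [[a + b]] else []) else _)
            = pvFA [PySem.Int.band b (-b)] a
        rw [if_pos heq, heq, pvFA]
      · have hlt : PySem.Int.band b (-b) < b := lt_of_le_of_ne hl.2 heq
        have hsub : 0 < b - PySem.Int.band b (-b) := by omega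
        obtain ⟨y, rest, hyr⟩ : ∃ y rest, pvBitsI (b - PySem.Int.band b (-b)) = y :: rest := by
          rcases hcase : pvBitsI (b - PySem.Int.band b (-b)) with _ | ⟨y, rest⟩
          · exact absurd hcase (pvBitsI_ne_nil _ hsub)
          · exact ⟨y, rest, rfl⟩
        rw [hyr, pvFA]
        show (if PySem.Int.band b (-b) = b then _
              else pvVisitA n (b - PySem.Int.band b (-b)) (a + PySem.Int.band b (-b)) ++
                (if a ≠ 0 then (pvVisitA n (b - PySem.Int.band b (-b)) 0).map
                    (fun xs => (a + PySem.Int.band b (-b)) :: xs) else [])) = _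
        rw [if_neg heq]
        rw [ih _ _ (by omega) (by omega), ih _ _ (by omega) (by omega), hyr]

-- reversed(range(2, j)) is (pvDesc (j-2)) shifted up by one
theorem pvRev_eq : ∀ j : Int, (PySem.List.pyRange 2 j 1).reverse = (pvDesc (j - 2)).map (· + 1) := by
  have hnat : ∀ n : Nat, (PySem.List.pyRange 2 (2 + (n : Int)) 1).reverse = (pvDesc (n : Int)).map (· + 1) := by
    intro n
    induction n with
    | zero =>
      rw [PySem.List.pyRange_one_eq_nil (by omega)]
      rw [pvDesc_neg (by omega)]
      rfl
    | succ m ih =>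
      push_cast
      rw [show (2 : Int) + ((m : Int) + 1) = (2 + (m : Int)) + 1 from by ring]
      rw [PySem.List.pyRange_one_succ_right (by omega), List.reverse_append,
        List.reverse_singleton, ih]
      have hp : (1 : Int) ≤ (m : Int) + 1 := by omega
      conv_rhs => rw [pvDesc_pos hp]
      rw [show ((m : Int) + 1 - 1) = (m : Int) from by ring]
      rw [List.map_cons, List.singleton_append]
      congr 1
      ring
  intro j
  by_cases hj : j ≤ 2
  · rw [PySem.List.pyRange_one_eq_nil (by omega)]
    rw [pvDesc_neg (by omega)]
    rfl
  · have h := hnat (j - 2).toNat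
    rw [show ((j - 2).toNat : Int) = j - 2 from by omega] at h
    rw [show (2 : Int) + (j - 2) = j from by ring] at h
    exact h

theorem pvDesc_mem : ∀ j : Int, ∀ k ∈ pvDesc j, 1 ≤ k := by
  intro j
  induction j using pvDesc.induct with
  | case1 j h ih =>
    intro k hk
    rw [pvDesc_pos h] at hk
    rcases List.mem_cons.mp hk with rfl | hk
    · exact h
    · exact ih k hk
  | case2 j h =>
    intro k hk
    rw [pvDesc_neg h] at hk
    simp at hk

theorem pvDesc_split : ∀ j : Int, 1 ≤ j → pvDesc j = (pvDesc (j - 1)).map (· + 1) ++ [1] := by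
  intro j
  induction j using pvDesc.induct with
  | case1 j h ih =>
    intro _
    by_cases h1 : 1 ≤ j - 1
    · calc pvDesc j = j :: pvDesc (j - 1) := pvDesc_pos h
        _ = j :: ((pvDesc (j - 1 - 1)).map (· + 1) ++ [1]) := by rw [ih h1]
        _ = (pvDesc (j - 1)).map (· + 1) ++ [1] := by
            rw [pvDesc_pos h1, List.map_cons, show j - 1 + 1 = j from by ring,
              List.cons_append]
    · rw [show j = 1 from by omega]
      rw [pvDesc_pos (by omega : (1:Int) ≤ 1)]
      rw [pvDesc_neg (by omega : ¬ (1:Int) ≤ 1 - 1)]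
      simp
  | case2 j h => intro h1; omega

theorem pvTails_append (s : List Int) (a : Int) (k1 k2 : List Int) :
    pvTails s a (k1 ++ k2) = pvTails s a k1 ++ pvTails s a k2 := by
  simp [pvTails]

theorem pvTails_map_succ (x : Int) (rest : List Int) (a : Int) :
    ∀ ks : List Int, (∀ k ∈ ks, 0 ≤ k) →
    pvTails (x :: rest) a (ks.map (· + 1)) = pvTails rest (a + x) ks := by
  intro ks hks
  induction ks with
  | nil => rfl
  | cons k t ih =>
    have hk : 0 ≤ k := hks k (List.mem_cons_self)
    simp only [List.map_cons, pvTails, List.flatMap_cons] at *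
    rw [ih (fun z hz => hks z (List.mem_cons_of_mem _ hz))]
    congr 1
    have h1 : (k + 1).toNat = k.toNat + 1 := by omega
    rw [h1]
    simp only [List.drop_succ_cons, List.take_succ_cons, pvSum_cons]
    congr 1
    funext xs
    congr 1
    ring

-- pvG unfolded into head :: pvTails form, for lists of length ≥ 2
theorem pvG_cons (s : List Int) (h : 2 ≤ s.length) :
    pvG s = [pvSum s] :: pvTails s 0 ((PySem.List.pyRange 2 ((s.length : Int) - 1) 1).reverse) := by
  rw [pvG, dif_neg (by omega)]
  congr 1
  conv_rhs => rw [pvTails, ← List.attach_map_subtype_val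
    ((PySem.List.pyRange 2 ((s.length : Int) - 1) 1).reverse)]
  rw [List.flatMap_map]
  simp

-- the main mutual characterisation: pvFA at 0 is pvG; pvFA at a > 0 is head :: pvTails over pvDesc
theorem pvMain : ∀ n : Nat, ∀ s : List Int, s.length = n → (∀ z ∈ s, 0 < z) →
    (pvFA s 0 = pvG s) ∧
    (∀ a : Int, 0 < a → s ≠ [] →
      pvFA s a = [a + pvSum s] :: pvTails s a (pvDesc ((s.length : Int) - 2))) := by
  intro n
  induction n using Nat.strong_induction_on with
  | _ n ih =>
    intro s hlen hpos
    match s with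
    | [] =>
      refine ⟨?_, ?_⟩
      · rw [pvG]; simp [pvFA]
      · intro a _ hne; exact absurd rfl hne
    | [x] =>
      refine ⟨?_, ?_⟩
      · rw [pvG]; simp [pvFA]
      · intro a ha _
        rw [pvFA, if_pos (by omega)]
        have : ((([x] : List Int).length : Int) - 2) = -1 := by simp
        rw [this, pvDesc, dif_neg (by omega)]
        simp [pvTails, pvSum]
    | x :: y :: rest =>
      have hx : 0 < x := hpos x (by simp)
      have hposyr : ∀ z ∈ y :: rest, 0 < z := fun z hz => hpos z (List.mem_cons_of_mem _ hz)
      have hlt : (y :: rest).length < n := by simp at hlen ⊢; omega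
      have IH := ih (y :: rest).length hlt (y :: rest) rfl hposyr
      have hm : ((x :: y :: rest).length : Int) = (y :: rest).length + 1 := by simp
      constructor
      · -- pvFA s 0 = pvG s
        rw [pvFA, if_neg (by simp)]
        rw [zero_add, List.append_nil]
        rw [IH.2 x hx (by simp)]
        rw [pvG_cons _ (by simp)]
        rw [pvRev_eq]
        have h3 : ((x :: y :: rest).length : Int) - 1 - 2 = ((y :: rest).length : Int) - 2 := by
          rw [hm]; ring
        rw [h3]
        rw [pvTails_map_succ x (y :: rest) 0 _
          (fun k hk => le_trans (by omega) (pvDesc_mem _ k hk))]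
        rw [zero_add, pvSum_cons, pvSum_cons, pvSum_cons]
      · -- pvFA s a, 0 < a
        intro a ha _
        rw [pvFA, if_pos (by omega)]
        rw [IH.2 (a + x) (by omega) (by simp)]
        rw [IH.1]
        have h4 : ((x :: y :: rest).length : Int) - 2 = ((y :: rest).length : Int) - 1 := by
          rw [hm]; ring
        rw [h4]
        by_cases hr : rest = []
        · subst hr
          -- length 2: both tails are empty
          rw [pvDesc, dif_neg (by simp)]
          rw [pvDesc, dif_neg (by simp)]
          rw [pvG, dif_pos (by simp)]
          simp [pvTails, pvSum]
          ring
        · have hr1 : 1 ≤ ((y :: rest).length : Int) - 1 := by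
            rcases rest with _ | ⟨z, t⟩
            · exact absurd rfl hr
            · simp
          rw [pvDesc_split _ hr1, pvTails_append]
          rw [pvTails_map_succ x (y :: rest) a _
            (fun k hk => le_trans (by omega) (pvDesc_mem _ k hk))]
          have h5 : ((y :: rest).length : Int) - 1 - 1 = ((y :: rest).length : Int) - 2 := by ring
          rw [h5]
          rw [List.cons_append]
          congr 1
          · rw [pvSum_cons, pvSum_cons]; congr 1; rw [pvSum_cons]; ring
          · congr 1
            simp only [pvTails, List.flatMap_cons, List.flatMap_nil, List.append_nil]
            have : ((1 : Int)).toNat = 1 := rfl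
            rw [this]
            simp only [List.drop_succ_cons, List.drop_zero, List.take_succ_cons,
              List.take_zero, pvSum_cons]
            congr 1
            funext xs
            congr 2
            simp [pvSum]

-- ===== VERDICT (by name: the statement is the Claim_ definition above) =====
theorem non_singleton_splits_spec : Claim_equal_non_singleton_splits := by
  intro bitmask _ hpre
  unfold Spec_non_singleton_splits non_singleton_splits non_singleton_splits_alt
  rw [pvVisit_eq _ _ _ hpre (by omega)]
  rw [pvBits_eq _ _ hpre (by omega)]
  exact (pvMain (pvBitsI bitmask).length (pvBitsI bitmask) rfl (pvBitsI_pos bitmask)).1
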